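-- pv_equiv track=rewrite | github.com/Kanthus123/Python | Uri Judge Online/2663 - fase.py | passaram
-- ===== SOURCE A (Python) =====
-- def passaram(x,k):
--     c = 0
--     cont = 0
--
--     for i in x:
--         if (c < i):
--             c = i
--
--     while(cont < k):
--         for i in x:
--             if(c == i):
--                 cont += 1
--         c = c - 1
--
--     return cont
-- ===== SOURCE B (Python) =====
-- def passaram(x, k):
--     if k <= 0:
--         return 0
--     s = sorted(x, reverse=True)
--     t = s[k - 1]
--     return sum(1 for v in x if v >= t)
-- ===== Notes on version B (the rewrite author's own statement) =====
-- stated objective: faster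
-- what changed: Instead of scanning the whole list once per candidate value while counting down from the maximum, B sorts once descending, reads the k-th largest element as the threshold, and counts elements >= that threshold in one pass.
import Mathlib
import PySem

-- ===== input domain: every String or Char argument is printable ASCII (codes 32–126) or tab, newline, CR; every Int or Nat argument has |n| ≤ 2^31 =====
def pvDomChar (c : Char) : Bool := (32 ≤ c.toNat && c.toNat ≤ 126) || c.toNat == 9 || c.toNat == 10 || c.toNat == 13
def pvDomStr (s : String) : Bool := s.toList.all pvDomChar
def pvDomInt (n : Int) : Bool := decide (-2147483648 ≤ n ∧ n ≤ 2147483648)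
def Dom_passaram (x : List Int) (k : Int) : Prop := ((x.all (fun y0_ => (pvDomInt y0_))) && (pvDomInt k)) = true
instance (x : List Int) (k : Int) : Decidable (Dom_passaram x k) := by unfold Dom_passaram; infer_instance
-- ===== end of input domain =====

-- B replaces A's count-down-by-one scan over the whole value range with one descending
-- sort, reading the k-th largest value and counting elements ≥ it in a single pass (faster).

-- ===== PORT A =====
-- Python's while-loop, with fuel; on every input admitted by Pre_passaram the loop
-- finishes strictly within the fuel passed below, so the fuel guard never fires there.
def passaramLoop (x : List Int) (k : Int) : Nat → Int → Int → Int
  | 0, _, cont => cont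
  | fuel+1, c, cont =>
    if cont < k then
      passaramLoop x k fuel (c - 1)
        (x.foldl (fun acc i => if c = i then acc + 1 else acc) cont)
    else cont

def passaram (x : List Int) (k : Int) : Int :=
  let c := x.foldl (fun c i => if c < i then i else c) 0
  -- fuel bound: counting down from c past the minimum element exhausts the list
  let lo := x.foldl min c
  passaramLoop x k (c - lo + 2).toNat c 0

-- ===== PORT B =====
def passaram_alt (x : List Int) (k : Int) : Int :=
  if k ≤ 0 then 0
  else
    match PySem.List.pyGet? (PySem.List.sorted x (fun v => v) true) (k - 1) with
    | none => 0   -- IndexError in Python; excluded by Pre_passaram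
    | some t => ((x.filter (fun v => t ≤ v)).length : Int)

-- ===== PRECONDITION & SPEC =====
-- Pre_ excludes exactly k > len(x): there A's while-loop never reaches cont = k and
-- loops forever (and B raises IndexError); everywhere else A returns normally.
def Pre_passaram (x : List Int) (k : Int) : Prop := k ≤ (x.length : Int)
instance (x : List Int) (k : Int) : Decidable (Pre_passaram x k) := by unfold Pre_passaram; infer_instance

def pvWitness_passaram : List Int × Int := ([3, 1, 2, 1], 2)

def Spec_passaram (x : List Int) (k : Int) (out : Int) : Prop := out = passaram_alt x k
instance (x : List Int) (k : Int) (out : Int) : Decidable (Spec_passaram x k out) := by unfold Spec_passaram; infer_instance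

-- ===== CLAIM (what is proved, stated in full; the proofs are below) =====
def Claim_equal_passaram : Prop := ∀ (x : List Int) (k : Int), Dom_passaram x k → Pre_passaram x k → Spec_passaram x k (passaram x k)

-- ===== LEMMAS AND PROOFS =====

-- number of elements of x that are ≥ v
def countGE (x : List Int) (v : Int) : Int := ((x.filter (fun i => v ≤ i)).length : Int)

-- the inner for-loop counts the occurrences of c
theorem foldl_count_eq (x : List Int) (c cont : Int) :
    x.foldl (fun acc i => if c = i then acc + 1 else acc) cont
      = cont + ((x.filter (fun i => c = i)).length : Int) := by
  induction x generalizing cont with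
  | nil => simp
  | cons a t ih =>
    by_cases h : c = a
    · rw [List.foldl_cons, if_pos h, ih, List.filter_cons]
      simp only [h, decide_true, if_true, List.length_cons]
      push_cast
      ring
    · rw [List.foldl_cons, if_neg h, ih, List.filter_cons]
      simp [h]

theorem filter_split_nat (x : List Int) (c : Int) :
    (x.filter (fun i => c ≤ i)).length
      = (x.filter (fun i => c + 1 ≤ i)).length + (x.filter (fun i => c = i)).length := by
  induction x with
  | nil => simp
  | cons a t ih =>
    by_cases h1 : c ≤ a <;> by_cases h2 : c < a <;> by_cases h3 : c = a <;>
      simp [h1, h2, h3] at ih ⊢ <;>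
      omega

theorem countGE_split (x : List Int) (c : Int) :
    countGE x c = countGE x (c + 1) + ((x.filter (fun i => c = i)).length : Int) := by
  unfold countGE
  rw [filter_split_nat x c]
  push_cast
  ring

theorem countGE_antitone (x : List Int) {u v : Int} (h : u ≤ v) :
    countGE x v ≤ countGE x u := by
  unfold countGE
  have : ∀ (t : List Int), (t.filter (fun i => v ≤ i)).length ≤ (t.filter (fun i => u ≤ i)).length := by
    intro t
    induction t with
    | nil => simp
    | cons a t ih =>
      by_cases h1 : v ≤ a <;> by_cases h2 : u ≤ a <;>
        simp [h1, h2] at ih ⊢ <;>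
        omega
  exact_mod_cast this x

theorem loop_done (x : List Int) (k : Int) (m : Nat) (c cont : Int) (h : ¬ cont < k) :
    passaramLoop x k (m + 1) c cont = cont := by
  simp [passaramLoop, h]

-- main characterisation of A's while-loop
theorem loop_eq (x : List Int) (k t : Int) (hge : k ≤ countGE x t) (hlt : countGE x (t + 1) < k) :
    ∀ (fuel : Nat) (c cont : Int), t ≤ c → cont = countGE x (c + 1) →
      (c - t).toNat + 2 ≤ fuel → passaramLoop x k fuel c cont = countGE x t := by
  intro fuel
  induction fuel with
  | zero => intro c cont _ _ hf; omega
  | succ fuel ih =>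
    intro c cont htc hcont hf
    have hcl : cont < k := by
      have : countGE x (c + 1) ≤ countGE x (t + 1) := countGE_antitone x (by omega)
      omega
    have hstep : x.foldl (fun acc i => if c = i then acc + 1 else acc) cont = countGE x c := by
      rw [foldl_count_eq, hcont, ← countGE_split]
    by_cases hcase : t ≤ c - 1
    · simp only [passaramLoop, if_pos hcl, hstep]
      exact ih (c - 1) (countGE x c) hcase (by congr 1; omega) (by omega)
    · have hct : c = t := by omega
      subst hct
      simp only [passaramLoop, if_pos hcl, hstep]
      obtain ⟨m, hm⟩ : ∃ m, fuel = m + 1 := ⟨fuel - 1, by omega⟩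
      rw [hm, loop_done x k m _ _ (by omega)]

-- take/drop filter helpers for the sorted list
theorem filter_take_all (s : List Int) (p : Int → Bool) :
    ∀ (m : Nat), (∀ i (h : i < s.length), i < m → p s[i]) → (s.take m).filter p = s.take m := by
  induction s with
  | nil => intro m _; simp
  | cons a tl ih =>
    intro m hp
    cases m with
    | zero => simp
    | succ m =>
      have h0 : p a := hp 0 (by simp) (by omega)
      rw [List.take_succ_cons, List.filter_cons, if_pos h0,
        ih m (fun i hi him => hp (i + 1) (by simpa using Nat.succ_lt_succ hi) (by omega))]

theorem filter_drop_none (s : List Int) (p : Int → Bool) :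
    ∀ (m : Nat), (∀ i (h : i < s.length), m ≤ i → p s[i] = false) → (s.drop m).filter p = [] := by
  induction s with
  | nil => intro m _; simp
  | cons a tl ih =>
    intro m hp
    cases m with
    | zero =>
      have h0 : p a = false := hp 0 (by simp) (by omega)
      simp only [List.drop_zero, List.filter_cons, h0]
      simpa using ih 0 (fun i hi _ => hp (i + 1) (by simpa using Nat.succ_lt_succ hi) (by omega))
    | succ m =>
      simp only [List.drop_succ_cons]
      exact ih m (fun i hi him => hp (i + 1) (by simpa using Nat.succ_lt_succ hi) (by omega))

theorem countGE_perm (x s : List Int) (h : s.Perm x) (v : Int) : countGE x v = countGE s v := by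
  unfold countGE
  rw [(h.filter _).length_eq]

theorem passaram_spec' (x : List Int) (k : Int) (hpre : Pre_passaram x k) :
    passaram x k = passaram_alt x k := by
  unfold Pre_passaram at hpre
  unfold passaram passaram_alt
  simp only []
  set c0 := x.foldl (fun c i => if c < i then i else c) 0 with hc0
  set lo := x.foldl min c0 with hlo
  have hmaxeq : c0 = x.foldl max 0 := by
    rw [hc0]
    congr 1
    funext a b
    simp [max_def]
    split_ifs <;> omega
  have hub : ∀ y ∈ x, y ≤ c0 := by
    rw [hmaxeq]; exact (PySem.List.le_foldl_max x 0).2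
  have hlole : lo ≤ c0 := (PySem.List.foldl_min_le x c0).1
  have hlolb : ∀ y ∈ x, lo ≤ y := (PySem.List.foldl_min_le x c0).2
  by_cases hk : k ≤ 0
  · obtain ⟨m, hm⟩ : ∃ m, (c0 - lo + 2).toNat = m + 1 := ⟨(c0 - lo + 2).toNat - 1, by omega⟩
    rw [hm, loop_done x k m c0 0 (by omega), if_pos hk]
  · rw [if_neg hk]
    rw [not_le] at hk
    set s := PySem.List.sorted x (fun v => v) true with hs
    have hperm : s.Perm x := PySem.List.sorted_perm x _ _
    have hslen : s.length = x.length := hperm.length_eq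
    obtain ⟨j, hjk⟩ : ∃ j : Nat, (j : Int) = k - 1 := ⟨(k - 1).toNat, by omega⟩
    have hj : j < s.length := by omega
    have hidx : PySem.List.pyGet? s (k - 1) = some s[j] := by
      rw [← hjk, PySem.List.pyGet?_natCast, List.getElem?_eq_getElem hj]
    rw [hidx]
    set t := s[j] with ht
    -- pairwise order of the reverse-sorted list
    have hpw : ∀ (p q : Nat) (hq : q < s.length) (hpq : p ≤ q), s[q] ≤ s[p]'(by omega) := by
      have h := PySem.List.sorted_pairwise_rev (xs := x) (key := fun v => v)
      rw [← hs] at h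
      rw [List.pairwise_iff_getElem] at h
      intro p q hq hpq
      rcases Nat.lt_or_ge p q with hlt | hge
      · exact h p q (by omega) hq hlt
      · have : p = q := by omega
        subst this; exact le_refl _
    -- (a) k ≤ countGE x t
    have ha : k ≤ countGE x t := by
      rw [countGE_perm x s hperm]
      have hsplit : s = s.take (j + 1) ++ s.drop (j + 1) := (List.take_append_drop _ _).symm
      have htake : (s.take (j + 1)).filter (fun i => t ≤ i) = s.take (j + 1) := by
        apply filter_take_all
        intro i hi him
        simp only [decide_eq_true_eq]
        exact hpw i j hj (by omega)
      calc k = ((j + 1 : Nat) : Int) := by push_cast; omega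
        _ ≤ _ := by
            unfold countGE
            conv_rhs => rw [hsplit]
            rw [List.filter_append, htake]
            simp only [List.length_append, List.length_take]
            push_cast
            omega
    -- (b) countGE x (t+1) < k
    have hb : countGE x (t + 1) < k := by
      rw [countGE_perm x s hperm]
      have hsplit : s = s.take j ++ s.drop j := (List.take_append_drop _ _).symm
      have hdrop : (s.drop j).filter (fun i => t + 1 ≤ i) = [] := by
        apply filter_drop_none
        intro i hi him
        simp only [decide_eq_false_iff_not, not_le]
        have := hpw j i hi him
        omega
      unfold countGE
      conv_lhs => rw [hsplit]
      rw [List.filter_append, hdrop]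
      simp only [List.append_nil]
      have := List.length_filter_le (fun i => decide (t + 1 ≤ i)) (s.take j)
      simp only [List.length_take] at this
      omega
    have htmem : t ∈ x := hperm.subset (List.getElem_mem hj)
    have htc0 : t ≤ c0 := hub t htmem
    have hlot : lo ≤ t := hlolb t htmem
    have hinit : (0 : Int) = countGE x (c0 + 1) := by
      unfold countGE
      rw [List.filter_eq_nil_iff.mpr]
      · simp
      · intro a ha'
        simp only [decide_eq_true_eq, not_le]
        have := hub a ha'
        omega
    rw [loop_eq x k t ha hb (c0 - lo + 2).toNat c0 0 htc0 hinit (by omega)]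
    rfl

-- ===== VERDICT (by name: the statement is the Claim_ definition above) =====
theorem passaram_spec : Claim_equal_passaram := by
  intro x k _ hpre
  unfold Spec_passaram
  exact passaram_spec' x k hpre
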